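-- pv_equiv track=rewrite | github.com/SeifElsallamy/kleaner | kleaner.py | freq2
-- ===== SOURCE A (Python) =====
-- from collections import Counter
--
-- def freq2(c):
--     newDirs = []
--     let = 4
--     for u in c:
--         u="/".join(u.split("/")[3:]) # remove domain and keep path
--         u = u.split("?")[0] # remove params
--         d = u.split("/") # split path
--         d = list(filter(None, d)) # remove white spaces (double paths and last path)
--         for p in range(len(d)):
--             newDir = d[p] + "*" + str(p) + "*" + str(len(d)) # build mapper, separator = *,
--             newDirs.append(newDir)# First value = path, second = dir order, third = total number of dirs
--
--     mapper = list(Counter(newDirs).most_common()) # change counter to list e.g., (path map, frequancy)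
--     for m in mapper:
--         lett = let
--         if m[1] > let:# if frequancy is more than four, (let more than four exist).
--             struct = m[0].split("*") # split the mapped path
--             for uu in range(len(c)):
--                 u = c[uu]
--                 u="/".join(u.split("/")[3:])
--                 u = u.split("?")[0]
--                 d = u.split("/")
--                 d = list(filter(None, d))
--                 for p in range(len(d)):
--                     newDir = d[p] + "*" + str(p) + "*" + str(len(d))
--                     newDir = newDir.split("*")
--                     if struct == newDir:
--                         if lett > 0:
--                             lett = lett -1
--                         else:
--                             c[uu] = ""
--     c = list(filter(None, c))
--     return c
-- ===== SOURCE B (Python) =====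
-- def freq2(c):
--     # One pass builds signature -> ordered list of url indices; frequent signatures
--     # then blank matching urls past the 4th via an index skip-set (no rescans).
--     def sigs(u):
--         u = "/".join(u.split("/")[3:])
--         u = u.split("?")[0]
--         d = [s for s in u.split("/") if s]
--         n = len(d)
--         return [s + "*" + str(i) + "*" + str(n) for i, s in enumerate(d)]
--
--     index = {}
--     for i, u in enumerate(c):
--         for k in sigs(u):
--             index.setdefault(k, []).append(i)
--
--     blanked = set()
--     for k, idxs in sorted(index.items(), key=lambda kv: len(kv[1]), reverse=True):
--         if len(idxs) > 4:
--             quota = 4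
--             for i in idxs:
--                 if i in blanked:
--                     continue
--                 if quota > 0:
--                     quota -= 1
--                 else:
--                     blanked.add(i)
--     return [u for i, u in enumerate(c) if i not in blanked and u]
-- ===== Notes on version B (the rewrite author's own statement) =====
-- stated objective: alternative
-- what changed: A rescans the whole url list (re-splitting every url) once per frequent signature in Counter order; B instead builds a signature-to-url-index map in one parsing pass and processes each frequent signature by walking only its own index list with a blanked-index skip set; B also does not mutate the caller's list, while A blanks entries of its argument in place (the proved equivalence is about the return value).
import Mathlib
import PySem

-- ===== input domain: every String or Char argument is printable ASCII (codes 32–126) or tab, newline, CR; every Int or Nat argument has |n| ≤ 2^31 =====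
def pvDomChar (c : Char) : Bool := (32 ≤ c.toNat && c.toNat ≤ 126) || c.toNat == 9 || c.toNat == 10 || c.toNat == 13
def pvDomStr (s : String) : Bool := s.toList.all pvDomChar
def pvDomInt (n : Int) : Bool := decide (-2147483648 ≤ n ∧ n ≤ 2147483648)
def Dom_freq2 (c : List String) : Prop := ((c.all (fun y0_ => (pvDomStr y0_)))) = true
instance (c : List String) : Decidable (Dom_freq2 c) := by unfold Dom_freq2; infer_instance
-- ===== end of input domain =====

-- B replaces A's per-frequent-signature rescans of the whole url list by a one-pass
-- signature-to-url-index map plus a blanked-index skip set (an alternative algorithm,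
-- same return value; note: the Python A blanks entries of its argument list in place,
-- B does not mutate -- the equivalence proved here is about the return value only).

-- ===== PORT A =====
-- s.split(sep) for the non-empty literal separators used ("/", "?", "*"); exact there
def pySplitNE (s sep : String) : List String := (PySem.Str.split? s sep).getD []

-- the path-segment list A computes (inline, twice) for a url:
-- "/".join(u.split("/")[3:]) ; split("?")[0] ; split("/") ; filter(None, ·)
def pvDirsA (u : String) : List String :=
  let u1 := PySem.Str.join "/" ((pySplitNE u "/").drop 3)
  let u2 := PySem.List.pyGetD (pySplitNE u1 "?") 0 ""
  (pySplitNE u2 "/").filter (fun s => !(s == ""))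

def freq2 (c : List String) : List String :=
  let lt : Int := 4
  let newDirs : List String :=
    c.foldl (fun nds u =>
      let d := pvDirsA u
      (PySem.List.pyRange 0 (d.length : Int) 1).foldl
        (fun nds p =>
          nds ++ [PySem.List.pyGetD d p "" ++ "*" ++ PySem.Int.toStr p ++ "*" ++
                  PySem.Int.toStr (d.length : Int)])
        nds) []
  let mapper : List (String × Int) :=
    PySem.List.sorted (PySem.Dict.counter newDirs).items (fun m => m.2) true
  let c2 := mapper.foldl (fun cc m =>
    if m.2 > lt then
      let struct := pySplitNE m.1 "*"
      ((PySem.List.pyRange 0 (cc.length : Int) 1).foldl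
        (fun (st : List String × Int) uu =>
          let u := PySem.List.pyGetD st.1 uu ""
          let d := pvDirsA u
          (PySem.List.pyRange 0 (d.length : Int) 1).foldl
            (fun (st2 : List String × Int) p =>
              let newDir := PySem.List.pyGetD d p "" ++ "*" ++ PySem.Int.toStr p ++ "*" ++
                            PySem.Int.toStr (d.length : Int)
              if struct == pySplitNE newDir "*" then
                if st2.2 > 0 then (st2.1, st2.2 - 1)
                else (PySem.List.pySetD st2.1 uu "", st2.2)
              else st2) st)
        (cc, lt)).1
    else cc) c
  c2.filter (fun s => !(s == ""))

-- ===== PORT B =====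
-- all "seg*pos*total" signatures of one url (B's sigs helper)
def pvSigsB (u : String) : List String :=
  let u1 := PySem.Str.join "/" ((pySplitNE u "/").drop 3)
  let u2 := PySem.List.pyGetD (pySplitNE u1 "?") 0 ""
  let d := (pySplitNE u2 "/").filter (fun s => !(s == ""))
  let n : Int := (d.length : Int)
  (PySem.List.enumerate d).map (fun is => is.2 ++ "*" ++ PySem.Int.toStr is.1 ++ "*" ++ PySem.Int.toStr n)

def freq2_alt (c : List String) : List String :=
  let index : PySem.Dict String (List Int) :=
    (PySem.List.enumerate c).foldl (fun idx iu =>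
      (pvSigsB iu.2).foldl (fun idx k => idx.modify k [] (fun l => l ++ [iu.1])) idx)
      PySem.Dict.empty
  let blanked : PySem.Set Int :=
    (PySem.List.sorted index.items (fun kv => (kv.2.length : Int)) true).foldl (fun bl kv =>
      if (kv.2.length : Int) > 4 then
        (kv.2.foldl (fun (st : PySem.Set Int × Int) i =>
          if st.1.contains i then st
          else if st.2 > 0 then (st.1, st.2 - 1)
          else (st.1.add i, st.2)) (bl, 4)).1
      else bl) (PySem.Set.ofList [])
  ((PySem.List.enumerate c).filter
      (fun iu => !(blanked.contains iu.1) && !(iu.2 == ""))).map (fun iu => iu.2)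

-- ===== PRECONDITION & SPEC =====
def Spec_freq2 (c : List String) (out : List String) : Prop := out = freq2_alt c
instance (c : List String) (out : List String) : Decidable (Spec_freq2 c out) := by unfold Spec_freq2; infer_instance

-- ===== CLAIM (what is proved, stated in full; the proofs are below) =====
def Claim_equal_freq2 : Prop := ∀ (c : List String), Dom_freq2 c → Spec_freq2 c (freq2 c)

-- ===== LEMMAS AND PROOFS =====

theorem join_cons' (sep y : List Char) (zs : List (List Char)) (h : zs ≠ []) :
    PySem.Chars.join sep (y :: zs) = y ++ sep ++ PySem.Chars.join sep zs := by
  cases zs with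
  | nil => exact absurd rfl h
  | cons a b => exact PySem.Chars.join_cons_cons sep y a b

theorem join_append_nil (sep : List Char) (ys : List (List Char)) (h : ys ≠ []) :
    PySem.Chars.join sep (ys ++ [[]]) = PySem.Chars.join sep ys ++ sep := by
  induction ys with
  | nil => exact absurd rfl h
  | cons y ys ih =>
    cases ys with
    | nil => simp [PySem.Chars.join_cons_cons, PySem.Chars.join_singleton]
    | cons a b =>
      rw [List.cons_append, join_cons' sep y _ (by simp), join_cons' sep y _ (by simp),
        ih (by simp)]
      simp

theorem join_last_append (sep : List Char) (ys : List (List Char)) (p e : List Char) :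
    PySem.Chars.join sep (ys ++ [p ++ e]) = PySem.Chars.join sep (ys ++ [p]) ++ e := by
  induction ys with
  | nil => simp [PySem.Chars.join_singleton]
  | cons y ys ih =>
    rw [List.cons_append, List.cons_append, join_cons' sep y _ (by simp),
      join_cons' sep y _ (by simp), ih]
    simp

theorem join_splitOn_go (sep : List Char) (hsep : sep ≠ []) :
    ∀ (fuel : Nat) (l cur : List Char) (acc : List (List Char)),
      l.length < fuel →
      PySem.Chars.join sep (PySem.Chars.splitOn.go sep fuel l cur acc) =
        PySem.Chars.join sep (acc.reverse ++ [cur.reverse]) ++ l := by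
  intro fuel
  induction fuel with
  | zero => intro l cur acc h; omega
  | succ fuel ih =>
    intro l cur acc h
    cases l with
    | nil =>
      rw [PySem.Chars.splitOn.go]
      simp
      omega
    | cons ch rest =>
      rw [PySem.Chars.splitOn.go]
      by_cases hp : sep.isPrefixOf (ch :: rest)
      · simp only [hp, if_true]
        have hpre : sep <+: (ch :: rest) := List.isPrefixOf_iff_prefix.mp hp
        obtain ⟨t, ht⟩ := hpre
        have hd : (ch :: rest).drop sep.length = t := by
          rw [← ht]; simp
        have hlen : ((ch :: rest).drop sep.length).length < fuel := by
          have : 1 ≤ sep.length := by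
            cases sep with | nil => exact absurd rfl hsep | cons a b => simp
          simp only [List.length_drop]
          simp at h ⊢
          omega
        rw [ih _ [] (cur.reverse :: acc) hlen]
        rw [hd, ← ht]
        rw [List.reverse_cons, List.reverse_nil]
        rw [join_append_nil sep _ (by simp)]
        simp
      · rw [if_neg (by simp [hp])]
        have : rest.length < fuel := by simp at h; omega
        rw [ih rest (ch :: cur) acc this]
        rw [List.reverse_cons]
        have := join_last_append sep acc.reverse cur.reverse [ch]
        rw [this]
        simp

theorem join_splitOn (sep : List Char) (hsep : sep ≠ []) (l : List Char) :
    PySem.Chars.join sep (PySem.Chars.splitOn l sep) = l := by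
  rw [PySem.Chars.splitOn, join_splitOn_go sep hsep _ _ _ _ (by omega)]
  simp [PySem.Chars.join_singleton]

theorem pySplitNE_star (s : String) :
    (pySplitNE s "*").map String.toList = PySem.Chars.splitOn s.toList ['*'] := by
  have hb : ("*" : String).toList = ['*'] := by decide
  have h := PySem.Str.split?_map s "*"
  rw [hb, PySem.Chars.split?] at h
  rw [if_neg (by simp)] at h
  cases hs : PySem.Str.split? s "*" with
  | none => rw [hs] at h; simp at h
  | some ls =>
    rw [hs] at h
    simp only [Option.map_some, Option.some.injEq] at h
    simpa [pySplitNE, hs] using h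

theorem pySplitNE_star_inj {s t : String} (h : pySplitNE s "*" = pySplitNE t "*") : s = t := by
  have h1 := pySplitNE_star s
  have h2 := pySplitNE_star t
  rw [h, h2] at h1
  have := congrArg (PySem.Chars.join ['*']) h1
  rw [join_splitOn ['*'] (by simp), join_splitOn ['*'] (by simp)] at this
  exact (String.toList_inj.mp this).symm

def natEnum (c : List String) (s : Nat) : List (Nat × String) :=
  match c with
  | [] => []
  | u :: t => (s, u) :: natEnum t (s + 1)
def sigFun (d : List String) (p : Nat) : String :=
  d.getD p "" ++ "*" ++ PySem.Int.toStr (p : Int) ++ "*" ++ PySem.Int.toStr (d.length : Int)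
def sigList (d : List String) : List String := (List.range d.length).map (sigFun d)
def occPairs (c : List String) : List (String × Int) :=
  (natEnum c 0).flatMap (fun iu => (sigList (pvDirsA iu.2)).map (fun k => (k, (iu.1 : Int))))
theorem natEnum_map_snd (c : List String) (s : Nat) :
    (natEnum c s).map (fun p => p.2) = c := by
  induction c generalizing s with
  | nil => rfl
  | cons u t ih => rw [natEnum]; simp [ih]
def mask (bl : PySem.Set Int) : List String → Nat → List String
  | [], _ => []
  | u :: t, j => (if bl.contains (j : Int) then "" else u) :: mask bl t (j + 1)

theorem length_mask (bl : PySem.Set Int) (c : List String) (j : Nat) :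
    (mask bl c j).length = c.length := by
  induction c generalizing j with
  | nil => rfl
  | cons u t ih => rw [mask]; simp [ih]

theorem mask_nil (c : List String) (j : Nat) : mask [] c j = c := by
  induction c generalizing j with
  | nil => rfl
  | cons u t ih => rw [mask]; simp [ih, PySem.Set.contains]

theorem getD_mask_general (bl : PySem.Set Int) (c : List String) (j i : Nat) :
    (mask bl c j).getD i "" = if bl.contains ((j + i : Nat) : Int) then "" else c.getD i "" := by
  induction c generalizing j i with
  | nil => simp [mask, List.getD]
  | cons u t ih =>
    cases i with
    | zero => simp [mask, List.getD]
    | succ i =>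
      rw [mask]
      simp only [List.getD_cons_succ]
      rw [ih (j+1) i]
      have : j + 1 + i = j + (i + 1) := by omega
      rw [this]

theorem getD_mask (bl : PySem.Set Int) (c : List String) (i : Nat) :
    (mask bl c 0).getD i "" = if bl.contains (i : Int) then "" else c.getD i "" := by
  simpa using getD_mask_general bl c 0 i

theorem contains_add_self (bl : PySem.Set Int) (x : Int) : (bl.add x).contains x = true := by
  rw [PySem.Set.contains_iff]
  rw [PySem.Set.mem_add]
  right; rfl

theorem contains_add_of (bl : PySem.Set Int) (x y : Int) (h : bl.contains y = true) :
    (bl.add x).contains y = true := by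
  rw [PySem.Set.contains_iff] at h ⊢
  rw [PySem.Set.mem_add]; left; exact h

theorem add_of_contains (bl : PySem.Set Int) (x : Int) (h : bl.contains x = true) :
    bl.add x = bl := by
  rw [PySem.Set.add, h]; rfl

theorem contains_add_iff (bl : PySem.Set Int) (x y : Int) (hxy : x ≠ y) :
    (bl.add x).contains y = bl.contains y := by
  rcases h : bl.contains y with _|_
  · rcases h2 : (bl.add x).contains y with _|_
    · rfl
    · rw [PySem.Set.contains_iff, PySem.Set.mem_add] at h2
      rcases h2 with h2|h2
      · rw [← PySem.Set.contains_iff bl y] at h2; rw [h] at h2; exact h2.symm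
      · exact absurd h2.symm hxy
  · exact contains_add_of bl x y h

theorem mask_add_out (bl : PySem.Set Int) (x : Int) (c : List String) (j : Nat)
    (h : ∀ i : Nat, j ≤ i → x ≠ (i : Int)) : mask (bl.add x) c j = mask bl c j := by
  induction c generalizing j with
  | nil => rfl
  | cons u t ih =>
    rw [mask, mask]
    congr 1
    · rw [contains_add_iff bl x (j : Int) (h j le_rfl)]
    · exact ih (j+1) (fun i hi => h i (by omega))

theorem set_mask_general (bl : PySem.Set Int) (c : List String) (j i : Nat) :
    (mask bl c j).set i "" = mask (bl.add ((j + i : Nat) : Int)) c j := by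
  induction c generalizing j i with
  | nil => rfl
  | cons u t ih =>
    cases i with
    | zero =>
      rw [mask, mask]
      simp only [List.set_cons_zero]
      congr 1
      · simp
      · rw [mask_add_out]
        intro i hi hx
        have := congrArg Int.toNat hx
        simp at this
        omega
    | succ i =>
      rw [mask, mask]
      simp only [List.set_cons_succ]
      rw [ih (j+1) i]
      have : j + 1 + i = j + (i + 1) := by omega
      rw [this]
      congr 1
      rw [contains_add_iff]
      intro hc
      have := congrArg Int.toNat hc
      simp at this
      omega

theorem set_mask (bl : PySem.Set Int) (c : List String) (i : Nat) :
    (mask bl c 0).set i "" = mask (bl.add (i : Int)) c 0 := by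
  simpa using set_mask_general bl c 0 i

theorem filter_mask (bl : PySem.Set Int) (c : List String) (j : Nat) :
    (mask bl c j).filter (fun s => !(s == "")) =
      ((natEnum c j).filter (fun iu => !(bl.contains (iu.1 : Int)) && !(iu.2 == ""))).map
        (fun iu => iu.2) := by
  induction c generalizing j with
  | nil => rfl
  | cons u t ih =>
    rcases h : bl.contains (j : Int) with _|_
    · have hm : ¬ ((j : Int) ∈ bl) := by
        intro hmem
        rw [← PySem.Set.contains_iff, h] at hmem
        exact Bool.false_ne_true hmem
      by_cases hu : u = ""
      · simp [mask, natEnum, hm, hu, ih (j+1)]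
      · simp [mask, natEnum, hm, hu, ih (j+1)]
    · have hm : ((j : Int) ∈ bl) := (PySem.Set.contains_iff _ _).mp h
      simp [mask, natEnum, hm, ih (j+1)]

theorem newDirs_eq (c : List String) :
    c.foldl (fun nds u =>
      let d := pvDirsA u
      (PySem.List.pyRange 0 (d.length : Int) 1).foldl
        (fun nds p =>
          nds ++ [PySem.List.pyGetD d p "" ++ "*" ++ PySem.Int.toStr p ++ "*" ++
                  PySem.Int.toStr (d.length : Int)])
        nds) [] = (occPairs c).map (fun p => p.1) := by
  have h1 : ∀ (nds : List String) (u : String),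
      (PySem.List.pyRange 0 ((pvDirsA u).length : Int) 1).foldl
        (fun nds p =>
          nds ++ [PySem.List.pyGetD (pvDirsA u) p "" ++ "*" ++ PySem.Int.toStr p ++ "*" ++
                  PySem.Int.toStr ((pvDirsA u).length : Int)])
        nds = nds ++ sigList (pvDirsA u) := by
    intro nds u
    rw [PySem.List.pyRange_zero_natCast, List.foldl_map]
    rw [sigList, ← PySem.List.foldl_append_singleton_eq_map (l := List.range (pvDirsA u).length)
      (f := sigFun (pvDirsA u)) (acc := nds)]
    apply PySem.List.foldl_congr_mem
    intro acc x _
    simp only [PySem.List.pyGetD_natCast, sigFun]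
  calc c.foldl (fun nds u =>
        let d := pvDirsA u
        (PySem.List.pyRange 0 (d.length : Int) 1).foldl
          (fun nds p =>
            nds ++ [PySem.List.pyGetD d p "" ++ "*" ++ PySem.Int.toStr p ++ "*" ++
                    PySem.Int.toStr (d.length : Int)])
          nds) []
      = c.foldl (fun nds u => nds ++ sigList (pvDirsA u)) [] := by
        apply PySem.List.foldl_congr_mem
        intro acc x _
        exact h1 acc x
    _ = c.flatMap (fun u => sigList (pvDirsA u)) := by
        rw [PySem.List.foldl_append_eq_flatMap]; rfl
    _ = (occPairs c).map (fun p => p.1) := by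
        rw [occPairs, List.map_flatMap]
        conv_lhs => rw [← natEnum_map_snd c 0]
        rw [List.flatMap_map]
        simp [List.map_map, Function.comp_def]
theorem natEnum_eq (c : List String) (s : Nat) :
    natEnum c s = (List.range c.length).map (fun j => (s + j, c.getD j "")) := by
  induction c generalizing s with
  | nil => rfl
  | cons u t ih =>
    rw [natEnum, ih (s+1)]
    simp [List.range_succ_eq_map, List.map_map, Function.comp_def]
    intro a _
    omega
theorem enumerate_eq_natEnum (c : List String) (s : Nat) :
    PySem.List.enumerate c (s : Int) = (natEnum c s).map (fun p => ((p.1 : Int), p.2)) := by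
  induction c generalizing s with
  | nil => rfl
  | cons u t ih =>
    rw [natEnum, PySem.List.enumerate]
    have : ((s : Int) + 1) = ((s + 1 : Nat) : Int) := by push_cast; ring
    rw [this, ih (s+1)]
    simp
theorem enumerate_zero (c : List String) :
    PySem.List.enumerate c 0 = (natEnum c 0).map (fun p => ((p.1 : Int), p.2)) :=
  enumerate_eq_natEnum c 0
theorem pvSigsB_eq' (u : String) : pvSigsB u = (PySem.List.enumerate (pvDirsA u) 0).map
      (fun is => is.2 ++ "*" ++ PySem.Int.toStr is.1 ++ "*" ++
        PySem.Int.toStr ((pvDirsA u).length : Int)) := rfl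

theorem pvSigsB_eq (u : String) : pvSigsB u = sigList (pvDirsA u) := by
  rw [pvSigsB_eq', enumerate_zero, natEnum_eq]
  simp only [List.map_map, sigList]
  apply List.map_congr_left
  intro j hj
  simp only [Function.comp_def, sigFun, Nat.zero_add]

def idxsOf (c : List String) (k : String) : List Int :=
  ((occPairs c).filter (fun p => p.1 == k)).map (fun p => p.2)

theorem keys_pairFold (l : List (String × Int)) (d : PySem.Dict String (List Int)) :
    (l.foldl (fun d p => d.modify p.1 [] (fun x => x ++ [p.2])) d).keys =
      (l.map (fun p => p.1)).foldl PySem.Set.add d.keys := by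
  induction l generalizing d with
  | nil => rfl
  | cons p t ih =>
    rw [List.foldl_cons, List.map_cons, List.foldl_cons, ih]
    congr 1
    rw [PySem.Dict.keys_modify]
    rcases h : d.contains p.1 with _|_
    · rw [PySem.Dict.keys_insert_of_not_contains _ _ h, PySem.Set.add, if_neg ?_]
      intro hc
      rw [PySem.Set.contains_iff, ← PySem.Dict.contains_iff_mem_keys] at hc
      rw [h] at hc; exact Bool.false_ne_true hc
    · rw [PySem.Dict.keys_insert_of_contains _ _ h, PySem.Set.add, if_pos ?_]
      rw [PySem.Set.contains_iff, ← PySem.Dict.contains_iff_mem_keys]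
      exact h

def pairFold (l : List (String × Int)) (d : PySem.Dict String (List Int)) :
    PySem.Dict String (List Int) :=
  l.foldl (fun d p => d.modify p.1 [] (fun x => x ++ [p.2])) d

theorem index_keys (c : List String) :
    (pairFold (occPairs c) PySem.Dict.empty).keys =
      PySem.Set.ofList ((occPairs c).map (fun p => p.1)) := by
  rw [pairFold, keys_pairFold, PySem.Set.ofList_eq_foldl]
  rfl

theorem index_items (c : List String) :
    (pairFold (occPairs c) PySem.Dict.empty).items =
      (PySem.Set.ofList ((occPairs c).map (fun p => p.1))).map (fun k => (k, idxsOf c k)) := by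
  have hnd : (pairFold (occPairs c) PySem.Dict.empty).keys.Nodup := by
    rw [index_keys]; exact PySem.Set.nodup_ofList _
  rw [PySem.Dict.items_eq_map_keys _ hnd [], index_keys]
  apply List.map_congr_left
  intro k _
  congr 1
  rw [pairFold, PySem.Dict.getD_foldl_modify_append]
  simp [PySem.Dict.getD_empty, idxsOf]

theorem indexB_eq (c : List String) :
    (PySem.List.enumerate c).foldl (fun idx iu =>
        (pvSigsB iu.2).foldl (fun idx k => idx.modify k [] (fun l => l ++ [iu.1])) idx)
      PySem.Dict.empty = pairFold (occPairs c) PySem.Dict.empty := by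
  rw [enumerate_zero, List.foldl_map, pairFold, occPairs, List.foldl_flatMap]
  apply PySem.List.foldl_congr_mem
  intro acc iu _
  rw [pvSigsB_eq, List.foldl_map]

theorem insertBy_map {α β : Type} (f : α → β) (before : β → β → Bool) (x : α) (l : List α) :
    PySem.List.insertBy before (f x) (l.map f) =
      (PySem.List.insertBy (fun a b => before (f a) (f b)) x l).map f := by
  induction l with
  | nil => rfl
  | cons y ys ih =>
    rw [List.map_cons, PySem.List.insertBy, PySem.List.insertBy]
    by_cases h : before (f x) (f y)
    · rw [if_pos h, if_pos h]; rfl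
    · rw [if_neg h, if_neg h, List.map_cons, ih]

theorem sorted_rev_map {α β κ : Type} [LT κ] [DecidableLT κ] (f : α → β) (key : β → κ)
    (l : List α) :
    PySem.List.sorted (l.map f) key true =
      (PySem.List.sorted l (fun x => key (f x)) true).map f := by
  rw [PySem.List.sorted_rev_eq_foldl_insertBy, PySem.List.sorted_rev_eq_foldl_insertBy]
  induction l using List.reverseRecOn with
  | nil => rfl
  | append_singleton ys y ih =>
    rw [List.map_append, List.foldl_append, List.foldl_append, ih]
    simp only [List.map_cons, List.foldl_cons, List.foldl_nil]
    exact insertBy_map f _ y _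

def bStep (st : PySem.Set Int × Int) (i : Int) : PySem.Set Int × Int :=
  if st.1.contains i then st
  else if st.2 > 0 then (st.1, st.2 - 1)
  else (st.1.add i, st.2)

def aStep (i : Nat) (st : PySem.Set Int × Int) : PySem.Set Int × Int :=
  if st.2 > 0 then (st.1, st.2 - 1) else (st.1.add (i : Int), st.2)

def cStep (i : Nat) (st : List String × Int) : List String × Int :=
  if st.2 > 0 then (st.1, st.2 - 1) else (PySem.List.pySetD st.1 (i : Int) "", st.2)

theorem foldl_const {α β : Type} (g : β → β) (l : List α) (i : β) :
    l.foldl (fun s _ => g s) i = g^[l.length] i := by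
  induction l generalizing i with
  | nil => rfl
  | cons x t ih => rw [List.foldl_cons, ih, List.length_cons, Function.iterate_succ_apply]

theorem aStep_fix (i : Nat) (m : Nat) (s : PySem.Set Int) (q : Int)
    (hc : s.contains (i : Int) = true) (hq : ¬ q > 0) :
    (aStep i)^[m] (s, q) = (s, q) := by
  induction m with
  | zero => rfl
  | succ m ih => rw [Function.iterate_succ_apply, aStep, if_neg hq, add_of_contains _ _ hc, ih]

theorem bStep_fix (i : Int) (m : Nat) (s : PySem.Set Int) (q : Int)
    (hc : s.contains i = true) :
    (List.replicate m i).foldl bStep (s, q) = (s, q) := by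
  induction m with
  | zero => rfl
  | succ m ih => rw [List.replicate_succ, List.foldl_cons, bStep, if_pos hc, ih]

theorem block_eq (i : Nat) :
    ∀ (m : Nat) (bl : PySem.Set Int) (q : Int), bl.contains (i : Int) = false →
      (List.replicate m ((i : Int))).foldl bStep (bl, q) = (aStep i)^[m] (bl, q) := by
  intro m
  induction m with
  | zero => intro bl q _; rfl
  | succ m ih =>
    intro bl q h
    rw [List.replicate_succ, List.foldl_cons, Function.iterate_succ_apply]
    have hni : ¬ (bl.contains ((i : Nat) : Int) = true) := by
      rw [h]; exact Bool.false_ne_true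
    rw [bStep, if_neg hni]
    by_cases hq : (q : Int) > 0
    · rw [if_pos hq, aStep, if_pos hq]
      exact ih bl (q-1) h
    · rw [if_neg hq, aStep, if_neg hq]
      rw [bStep_fix _ _ _ _ (contains_add_self bl (i : Int))]
      rw [aStep_fix _ _ _ _ (contains_add_self bl (i : Int)) hq]


theorem count_sigList_eq (d : List String) (k : String) :
    ((List.range d.length).filter (fun p => sigFun d p == k)).length =
      List.count k (sigList d) := by
  rw [sigList, List.count_eq_countP, List.countP_map, ← List.countP_eq_length_filter]
  rfl

theorem pscan_eq (d : List String) (k : String) (uu : Nat) (st : List String × Int) :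
    (PySem.List.pyRange 0 (d.length : Int) 1).foldl
      (fun (st2 : List String × Int) p =>
        let newDir := PySem.List.pyGetD d p "" ++ "*" ++ PySem.Int.toStr p ++ "*" ++
                      PySem.Int.toStr (d.length : Int)
        if pySplitNE k "*" == pySplitNE newDir "*" then
          if st2.2 > 0 then (st2.1, st2.2 - 1)
          else (PySem.List.pySetD st2.1 ((uu : Nat) : Int) "", st2.2)
        else st2) st =
    (cStep uu)^[List.count k (sigList d)] st := by
  rw [PySem.List.pyRange_zero_natCast, List.foldl_map]
  have h1 : List.foldl
      (fun (st2 : List String × Int) (p : Nat) =>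
        let newDir := PySem.List.pyGetD d ((p : Nat) : Int) "" ++ "*" ++
                      PySem.Int.toStr ((p : Nat) : Int) ++ "*" ++
                      PySem.Int.toStr (d.length : Int)
        if pySplitNE k "*" == pySplitNE newDir "*" then
          if st2.2 > 0 then (st2.1, st2.2 - 1)
          else (PySem.List.pySetD st2.1 ((uu : Nat) : Int) "", st2.2)
        else st2) st (List.range d.length) =
      List.foldl (fun (st2 : List String × Int) (p : Nat) =>
        if sigFun d p == k then cStep uu st2 else st2) st (List.range d.length) := by
    apply PySem.List.foldl_congr_mem
    intro st2 p _
    simp only [PySem.List.pyGetD_natCast]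
    by_cases hk : sigFun d p = k
    · have hc : (pySplitNE k "*" == pySplitNE (d.getD p "" ++ "*" ++
          PySem.Int.toStr (p : Int) ++ "*" ++ PySem.Int.toStr (d.length : Int)) "*") = true := by
        rw [beq_iff_eq]
        rw [show d.getD p "" ++ "*" ++ PySem.Int.toStr (p : Int) ++ "*" ++
            PySem.Int.toStr (d.length : Int) = sigFun d p from rfl, hk]
      have ht : (sigFun d p == k) = true := beq_iff_eq.mpr hk
      rw [hc, ht]
      rfl
    · have hc : (pySplitNE k "*" == pySplitNE (d.getD p "" ++ "*" ++
          PySem.Int.toStr (p : Int) ++ "*" ++ PySem.Int.toStr (d.length : Int)) "*") = false := by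
        rw [beq_eq_false_iff_ne]
        intro hsp
        exact hk (pySplitNE_star_inj hsp).symm
      have hf : (sigFun d p == k) = false := beq_eq_false_iff_ne.mpr hk
      rw [hc, hf]
      rfl
  rw [h1]
  rw [PySem.List.foldl_if_eq_foldl_filter (fun p => sigFun d p == k)
    (fun st2 _ => cStep uu st2)]
  rw [foldl_const, count_sigList_eq]

theorem iterate_mask (c : List String) (i : Nat) :
    ∀ (m : Nat) (bl : PySem.Set Int) (q : Int),
      (cStep i)^[m] (mask bl c 0, q) =
        (mask ((aStep i)^[m] (bl, q)).1 c 0, ((aStep i)^[m] (bl, q)).2) := by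
  intro m
  induction m with
  | zero => intro bl q; rfl
  | succ m ih =>
    intro bl q
    rw [Function.iterate_succ_apply, Function.iterate_succ_apply]
    by_cases hq : (0 : Int) < q
    · have e1 : cStep i (mask bl c 0, q) = (mask bl c 0, q - 1) := by
        simp only [cStep]
        rw [if_pos hq]
      have e2 : aStep i (bl, q) = (bl, q - 1) := by
        simp only [aStep]
        rw [if_pos hq]
      rw [e1, e2]
      exact ih bl (q-1)
    · have e1 : cStep i (mask bl c 0, q) = (mask (bl.add (i : Int)) c 0, q) := by
        simp only [cStep]
        rw [if_neg hq, PySem.List.pySetD_natCast, set_mask]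
      have e2 : aStep i (bl, q) = (bl.add (i : Int), q) := by
        simp only [aStep]
        rw [if_neg hq]
      rw [e1, e2]
      exact ih (bl.add (i : Int)) q

theorem idxs_blocks (c : List String) (k : String) :
    idxsOf c k = (natEnum c 0).flatMap
      (fun iu => List.replicate (List.count k (sigList (pvDirsA iu.2))) ((iu.1 : Int))) := by
  rw [idxsOf, occPairs, List.filter_flatMap, List.map_flatMap]
  apply List.flatMap_congr
  intro iu _
  rw [List.filter_map]
  rw [List.map_map]
  have h2 : ((fun p => p.1 == k) ∘ fun k1 : String => (k1, (iu.1 : Int))) = fun x => x == k := rfl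
  rw [h2]
  have h3 : ((fun p : String × Int => p.2) ∘ fun k1 : String => (k1, (iu.1 : Int))) =
      fun _ => (iu.1 : Int) := rfl
  have h4 : List.count k (sigList (pvDirsA iu.2)) =
      (List.filter (fun x => x == k) (sigList (pvDirsA iu.2))).length := by
    rw [List.count_eq_countP, List.countP_eq_length_filter]
  rw [h3, List.map_const', h4]

theorem pvDirsA_empty : pvDirsA "" = [] := by decide

theorem natEnum_map_fst (c : List String) :
    (natEnum c 0).map (fun p => p.1) = List.range c.length := by
  rw [natEnum_eq]
  simp [Function.comp_def]

theorem natEnum_getD (c : List String) :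
    ∀ p ∈ natEnum c 0, c.getD p.1 "" = p.2 := by
  intro p hp
  rw [natEnum_eq] at hp
  obtain ⟨j, hj, rfl⟩ := List.mem_map.mp hp
  simp

def ubody (k : String) (st : List String × Int) (iu : Nat × String) : List String × Int :=
  let u := PySem.List.pyGetD st.1 ((iu.1 : Nat) : Int) ""
  let d := pvDirsA u
  (PySem.List.pyRange 0 (d.length : Int) 1).foldl
    (fun (st2 : List String × Int) p =>
      let newDir := PySem.List.pyGetD d p "" ++ "*" ++ PySem.Int.toStr p ++ "*" ++
                    PySem.Int.toStr (d.length : Int)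
      if pySplitNE k "*" == pySplitNE newDir "*" then
        if st2.2 > 0 then (st2.1, st2.2 - 1)
        else (PySem.List.pySetD st2.1 ((iu.1 : Nat) : Int) "", st2.2)
      else st2) st

theorem url_step (c : List String) (k : String) (iu : Nat × String)
    (hok : c.getD iu.1 "" = iu.2) (bl : PySem.Set Int) (q : Int) :
    ubody k (mask bl c 0, q) iu =
      (mask ((List.replicate (List.count k (sigList (pvDirsA iu.2)))
          ((iu.1 : Int))).foldl bStep (bl, q)).1 c 0,
       ((List.replicate (List.count k (sigList (pvDirsA iu.2)))
          ((iu.1 : Int))).foldl bStep (bl, q)).2) := by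
  have hu : PySem.List.pyGetD (mask bl c 0) ((iu.1 : Nat) : Int) "" =
      if bl.contains ((iu.1 : Nat) : Int) then "" else iu.2 := by
    rw [PySem.List.pyGetD_natCast, getD_mask, hok]
  rcases hbl : bl.contains ((iu.1 : Nat) : Int) with _|_
  · simp only [ubody]
    rw [hu, if_neg (by rw [hbl]; exact Bool.false_ne_true)]
    rw [pscan_eq (pvDirsA iu.2) k iu.1]
    rw [iterate_mask]
    rw [← block_eq iu.1 _ bl q hbl]
  · simp only [ubody]
    rw [hu, if_pos hbl, pvDirsA_empty]
    rw [show (([] : List String).length : Int) = 0 from rfl]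
    rw [PySem.List.pyRange_one_eq_nil le_rfl]
    rw [bStep_fix _ _ _ _ hbl]
    rfl

theorem scan_blocks (c : List String) (k : String) :
    ∀ (l : List (Nat × String)), (∀ p ∈ l, c.getD p.1 "" = p.2) →
      ∀ (bl : PySem.Set Int) (q : Int),
      l.foldl (ubody k) (mask bl c 0, q) =
      (mask ((l.flatMap (fun iu =>
          List.replicate (List.count k (sigList (pvDirsA iu.2))) ((iu.1 : Int)))).foldl
            bStep (bl, q)).1 c 0,
       ((l.flatMap (fun iu =>
          List.replicate (List.count k (sigList (pvDirsA iu.2))) ((iu.1 : Int)))).foldl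
            bStep (bl, q)).2) := by
  intro l
  induction l with
  | nil => intro _ bl q; rfl
  | cons iu t ih =>
    intro hok bl q
    rw [List.foldl_cons, List.flatMap_cons, List.foldl_append]
    have hmem : iu ∈ iu :: t := List.mem_cons_self
    rw [url_step c k iu (hok iu hmem) bl q]
    generalize (List.replicate (List.count k (sigList (pvDirsA iu.2)))
        ((iu.1 : Int))).foldl bStep (bl, q) = X
    obtain ⟨bl2, q2⟩ := X
    exact ih (fun p hp => hok p (List.mem_cons_of_mem _ hp)) bl2 q2

theorem idxs_length (c : List String) (k : String) :
    ((idxsOf c k).length : Int) = (List.count k ((occPairs c).map (fun p => p.1)) : Int) := by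
  rw [idxsOf, List.length_map, List.count_eq_countP, List.countP_map,
    List.countP_eq_length_filter]
  rfl

def sKeys (c : List String) : List String :=
  PySem.List.sorted (PySem.Set.ofList ((occPairs c).map (fun p => p.1)))
    (fun k => ((idxsOf c k).length : Int)) true

def bFold (c : List String) : PySem.Set Int :=
  (sKeys c).foldl (fun bl k =>
    if ((idxsOf c k).length : Int) > 4 then ((idxsOf c k).foldl bStep (bl, 4)).1 else bl) []

theorem sig_pass (c : List String) (k : String) (bl : PySem.Set Int) :
    ((PySem.List.pyRange 0 ((mask bl c 0).length : Int) 1).foldl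
      (fun (st : List String × Int) uu =>
        let u := PySem.List.pyGetD st.1 uu ""
        let d := pvDirsA u
        (PySem.List.pyRange 0 (d.length : Int) 1).foldl
          (fun (st2 : List String × Int) p =>
            let newDir := PySem.List.pyGetD d p "" ++ "*" ++ PySem.Int.toStr p ++ "*" ++
                          PySem.Int.toStr (d.length : Int)
            if pySplitNE k "*" == pySplitNE newDir "*" then
              if st2.2 > 0 then (st2.1, st2.2 - 1)
              else (PySem.List.pySetD st2.1 uu "", st2.2)
            else st2) st)
      (mask bl c 0, 4)).1 =
    mask (((idxsOf c k).foldl bStep (bl, 4)).1) c 0 := by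
  rw [length_mask, PySem.List.pyRange_zero_natCast, List.foldl_map]
  rw [← natEnum_map_fst, List.foldl_map]
  rw [show (fun (x : List String × Int) (y : Nat × String) =>
      (fun (st : List String × Int) (uu : Nat) =>
        let u := PySem.List.pyGetD st.1 ((uu : Nat) : Int) ""
        let d := pvDirsA u
        (PySem.List.pyRange 0 (d.length : Int) 1).foldl
          (fun (st2 : List String × Int) p =>
            let newDir := PySem.List.pyGetD d p "" ++ "*" ++ PySem.Int.toStr p ++ "*" ++
                          PySem.Int.toStr (d.length : Int)
            if pySplitNE k "*" == pySplitNE newDir "*" then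
              if st2.2 > 0 then (st2.1, st2.2 - 1)
              else (PySem.List.pySetD st2.1 ((uu : Nat) : Int) "", st2.2)
            else st2) st) x y.1) = ubody k from rfl]
  rw [scan_blocks c k (natEnum c 0) (natEnum_getD c) bl 4]
  rw [← idxs_blocks]

theorem main_pass (c : List String) :
    ∀ (S : List String) (bl : PySem.Set Int),
      S.foldl (fun cc k =>
        if (List.count k ((occPairs c).map (fun p => p.1)) : Int) > 4 then
          ((PySem.List.pyRange 0 (cc.length : Int) 1).foldl
            (fun (st : List String × Int) uu =>
              let u := PySem.List.pyGetD st.1 uu ""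
              let d := pvDirsA u
              (PySem.List.pyRange 0 (d.length : Int) 1).foldl
                (fun (st2 : List String × Int) p =>
                  let newDir := PySem.List.pyGetD d p "" ++ "*" ++ PySem.Int.toStr p ++ "*" ++
                                PySem.Int.toStr (d.length : Int)
                  if pySplitNE k "*" == pySplitNE newDir "*" then
                    if st2.2 > 0 then (st2.1, st2.2 - 1)
                    else (PySem.List.pySetD st2.1 uu "", st2.2)
                  else st2) st)
            (cc, 4)).1
        else cc) (mask bl c 0)
      = mask (S.foldl (fun bl k =>
          if ((idxsOf c k).length : Int) > 4 then
            ((idxsOf c k).foldl bStep (bl, 4)).1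
          else bl) bl) c 0 := by
  intro S
  induction S with
  | nil => intro bl; rfl
  | cons k S ih =>
    intro bl
    rw [List.foldl_cons, List.foldl_cons]
    by_cases hc : (List.count k ((occPairs c).map (fun p => p.1)) : Int) > 4
    · have hc2 : ((idxsOf c k).length : Int) > 4 := by rw [idxs_length]; exact hc
      rw [if_pos hc, if_pos hc2, sig_pass c k bl]
      exact ih _
    · have hc2 : ¬ ((idxsOf c k).length : Int) > 4 := by rw [idxs_length]; exact hc
      rw [if_neg hc, if_neg hc2]
      exact ih bl

theorem B_eq (c : List String) :
    freq2_alt c = ((natEnum c 0).filter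
      (fun iu => !((bFold c).contains (iu.1 : Int)) && !(iu.2 == ""))).map (fun iu => iu.2) := by
  simp only [freq2_alt]
  rw [indexB_eq, index_items]
  rw [sorted_rev_map (fun k => (k, idxsOf c k)) (fun kv => ((kv.2.length : Nat) : Int))]
  rw [List.foldl_map, enumerate_zero, List.filter_map, List.map_map]
  rfl

theorem main_pass' (c : List String) (S : List String) :
    S.foldl (fun cc k =>
        if (List.count k ((occPairs c).map (fun p => p.1)) : Int) > 4 then
          ((PySem.List.pyRange 0 (cc.length : Int) 1).foldl
            (fun (st : List String × Int) uu =>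
              let u := PySem.List.pyGetD st.1 uu ""
              let d := pvDirsA u
              (PySem.List.pyRange 0 (d.length : Int) 1).foldl
                (fun (st2 : List String × Int) p =>
                  let newDir := PySem.List.pyGetD d p "" ++ "*" ++ PySem.Int.toStr p ++ "*" ++
                                PySem.Int.toStr (d.length : Int)
                  if pySplitNE k "*" == pySplitNE newDir "*" then
                    if st2.2 > 0 then (st2.1, st2.2 - 1)
                    else (PySem.List.pySetD st2.1 uu "", st2.2)
                  else st2) st)
            (cc, 4)).1
        else cc) c
      = mask (S.foldl (fun bl k =>
          if ((idxsOf c k).length : Int) > 4 then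
            ((idxsOf c k).foldl bStep (bl, 4)).1
          else bl) []) c 0 := by
  have h0 := main_pass c S []
  rw [mask_nil] at h0
  exact h0

theorem A_eq (c : List String) :
    freq2 c = (mask (bFold c) c 0).filter (fun s => !(s == "")) := by
  simp only [freq2]
  rw [newDirs_eq, PySem.Dict.items_counter]
  rw [sorted_rev_map (fun k => (k, (List.count k ((occPairs c).map (fun p => p.1)) : Int)))
    (fun m => m.2)]
  rw [List.foldl_map]
  have hkey : (fun x : String =>
      ((x, (List.count x ((occPairs c).map (fun p => p.1)) : Int))).2) =
      (fun x : String => ((idxsOf c x).length : Int)) := by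
    funext x
    exact (idxs_length c x).symm
  rw [hkey]
  rw [main_pass' c]
  rfl

-- ===== VERDICT (by name: the statement is the Claim_ definition above) =====
theorem freq2_spec : Claim_equal_freq2 := by
  intro c _
  unfold Spec_freq2
  rw [A_eq, filter_mask, B_eq]
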